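-- pv_equiv track=rewrite | github.com/mariazhak/finalProject | main.py | year_reader
-- ===== SOURCE A (Python) =====
-- def year_reader(csv_reader):
--     year_period = {'1950': [], '1970': [], '2000': [], '2024': [], 'DM': []}
--     for row in csv_reader:
--         year_period['DM'].append(row[0])
--         if int(row[2]) <= 1950:
--             year_period['1950'].append(row[0])
--         elif int(row[2]) <= 1970:
--             year_period['1970'].append(row[0])
--         elif int(row[2]) <= 2000:
--             year_period['2000'].append(row[0])
--         else:
--             year_period['2024'].append(row[0])
--     return year_period
-- ===== SOURCE B (Python) =====
-- def year_reader(csv_reader):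
--     # Stage 1: extract (name, year) pairs once; Stage 2: one filter pass per bucket.
--     pairs = [(row[0], int(row[2])) for row in csv_reader]
--     return {
--         '1950': [n for n, y in pairs if y <= 1950],
--         '1970': [n for n, y in pairs if 1950 < y <= 1970],
--         '2000': [n for n, y in pairs if 1970 < y <= 2000],
--         '2024': [n for n, y in pairs if 2000 < y],
--         'DM':   [n for n, _ in pairs],
--     }
-- ===== Notes on version B (the rewrite author's own statement) =====
-- stated objective: alternative
-- what changed: Replaces the single bucketing loop with mutable per-key appends by a staged pipeline: one pass extracting (name, year) pairs, then an independent filter pass per period building each bucket as an interval comprehension.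
import Mathlib
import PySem

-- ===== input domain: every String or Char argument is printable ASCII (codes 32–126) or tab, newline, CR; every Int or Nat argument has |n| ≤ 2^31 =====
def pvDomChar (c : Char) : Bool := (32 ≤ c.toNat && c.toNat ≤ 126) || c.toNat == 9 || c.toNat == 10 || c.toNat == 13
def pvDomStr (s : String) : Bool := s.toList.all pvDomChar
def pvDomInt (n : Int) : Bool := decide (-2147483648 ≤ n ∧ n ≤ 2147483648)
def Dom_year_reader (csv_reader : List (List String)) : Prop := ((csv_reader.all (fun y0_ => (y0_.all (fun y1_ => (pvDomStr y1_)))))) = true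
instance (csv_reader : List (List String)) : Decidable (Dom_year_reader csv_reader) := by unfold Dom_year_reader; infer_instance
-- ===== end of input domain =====

-- B replaces A's single bucketing loop over a mutable dict by a staged pipeline: one pass
-- extracting (name, year) pairs, then one independent interval-filter pass per period
-- (alternative structure, same cost); equal return value on all inputs where A returns.


-- ===== PORT A =====
-- one loop iteration of A: append row[0] to 'DM', then to the bucket chosen by the if/elif chain
def yrStepA (yp : PySem.Dict String (List String)) (row : List String) :
    PySem.Dict String (List String) :=
  let r0 := (PySem.List.pyGet? row (0 : Int)).getD ""
  let yp := yp.modify "DM" [] (· ++ [r0])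
  if ((PySem.Int.ofStr? ((PySem.List.pyGet? row (2 : Int)).getD "")).getD 0) ≤ 1950 then
    yp.modify "1950" [] (· ++ [r0])
  else if ((PySem.Int.ofStr? ((PySem.List.pyGet? row (2 : Int)).getD "")).getD 0) ≤ 1970 then
    yp.modify "1970" [] (· ++ [r0])
  else if ((PySem.Int.ofStr? ((PySem.List.pyGet? row (2 : Int)).getD "")).getD 0) ≤ 2000 then
    yp.modify "2000" [] (· ++ [r0])
  else
    yp.modify "2024" [] (· ++ [r0])

def year_reader (csv_reader : List (List String)) : List (String × List String) :=
  (csv_reader.foldl yrStepA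
    (PySem.Dict.mk [("1950", []), ("1970", []), ("2000", []), ("2024", []), ("DM", [])])).items

-- ===== PORT B =====
-- stage 1 of B: the (row[0], int(row[2])) pairs
def yrPairs (csv_reader : List (List String)) : List (String × Int) :=
  csv_reader.map (fun row =>
    ((PySem.List.pyGet? row (0 : Int)).getD "",
     (PySem.Int.ofStr? ((PySem.List.pyGet? row (2 : Int)).getD "")).getD 0))

-- stage 2 of B: one interval-filter comprehension per bucket (dict literal = assoc list)
def year_reader_alt (csv_reader : List (List String)) : List (String × List String) :=
  let ps := yrPairs csv_reader
  [("1950", (ps.filter (fun p => decide (p.2 ≤ 1950))).map Prod.fst),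
   ("1970", (ps.filter (fun p => decide (1950 < p.2 ∧ p.2 ≤ 1970))).map Prod.fst),
   ("2000", (ps.filter (fun p => decide (1970 < p.2 ∧ p.2 ≤ 2000))).map Prod.fst),
   ("2024", (ps.filter (fun p => decide (2000 < p.2))).map Prod.fst),
   ("DM", ps.map Prod.fst)]

-- ===== PRECONDITION & SPEC =====
-- Pre_ excludes exactly the inputs on which Python A raises: a row shorter than 3 entries
-- (IndexError on row[2]) or whose row[2] is not int-parseable (ValueError on int(row[2])).
def Pre_year_reader (csv_reader : List (List String)) : Prop :=
  (csv_reader.all (fun row =>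
    ((PySem.List.pyGet? row (2 : Int)).map (fun s => (PySem.Int.ofStr? s).isSome)).getD false))
    = true
instance (csv_reader : List (List String)) : Decidable (Pre_year_reader csv_reader) := by
  unfold Pre_year_reader; infer_instance

def pvWitness_year_reader : List (List String) :=
  [["Alice", "f", "1950"], ["Bob", "m", "1999"], ["Carol", "f", " 2010 "]]

def Spec_year_reader (csv_reader : List (List String)) (out : List (String × List String)) : Prop := out = year_reader_alt csv_reader
instance (csv_reader : List (List String)) (out : List (String × List String)) : Decidable (Spec_year_reader csv_reader out) := by unfold Spec_year_reader; infer_instance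

-- ===== CLAIM (what is proved, stated in full; the proofs are below) =====
def Claim_equal_year_reader : Prop := ∀ (csv_reader : List (List String)), Dom_year_reader csv_reader → Pre_year_reader csv_reader → Spec_year_reader csv_reader (year_reader csv_reader)

-- ===== LEMMAS AND PROOFS =====

-- A's loop, started from arbitrary bucket contents, ends with each bucket extended by
-- exactly B's interval filter of the (name, year) pairs
lemma yr_loop (rows : List (List String)) :
    ∀ (a b c e dm : List String),
      rows.foldl yrStepA
          (PySem.Dict.mk [("1950", a), ("1970", b), ("2000", c), ("2024", e), ("DM", dm)])
        = PySem.Dict.mk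
            [("1950", a ++ ((yrPairs rows).filter (fun p => decide (p.2 ≤ 1950))).map Prod.fst),
             ("1970", b ++ ((yrPairs rows).filter (fun p => decide (1950 < p.2 ∧ p.2 ≤ 1970))).map Prod.fst),
             ("2000", c ++ ((yrPairs rows).filter (fun p => decide (1970 < p.2 ∧ p.2 ≤ 2000))).map Prod.fst),
             ("2024", e ++ ((yrPairs rows).filter (fun p => decide (2000 < p.2))).map Prod.fst),
             ("DM", dm ++ (yrPairs rows).map Prod.fst)] := by
  induction rows with
  | nil => intro a b c e dm; simp [yrPairs]
  | cons row rest ih =>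
    intro a b c e dm
    simp only [List.foldl_cons]
    set y := (PySem.Int.ofStr? ((PySem.List.pyGet? row (2 : Int)).getD "")).getD 0 with hy
    set r0 := (PySem.List.pyGet? row (0 : Int)).getD "" with hr0
    have hpairs : yrPairs (row :: rest) = (r0, y) :: yrPairs rest := by
      simp [yrPairs, ← hy, ← hr0]
    by_cases h1 : y ≤ 1950
    · have hA : yrStepA (PySem.Dict.mk [("1950", a), ("1970", b), ("2000", c), ("2024", e), ("DM", dm)]) row
          = PySem.Dict.mk [("1950", a ++ [r0]), ("1970", b), ("2000", c), ("2024", e), ("DM", dm ++ [r0])] := by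
        simp [yrStepA, ← hy, ← hr0, h1, PySem.Dict.modify, PySem.Dict.insert, PySem.Dict.getD,
          PySem.Dict.get?, PySem.Dict.contains]
      rw [hA, ih]
      simp [hpairs, h1, show ¬ (1950 < y) by omega, show ¬ (1970 < y) by omega, show ¬ (2000 < y) by omega]
    · by_cases h2 : y ≤ 1970
      · have hA : yrStepA (PySem.Dict.mk [("1950", a), ("1970", b), ("2000", c), ("2024", e), ("DM", dm)]) row
            = PySem.Dict.mk [("1950", a), ("1970", b ++ [r0]), ("2000", c), ("2024", e), ("DM", dm ++ [r0])] := by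
          simp [yrStepA, ← hy, ← hr0, h1, h2, PySem.Dict.modify, PySem.Dict.insert, PySem.Dict.getD,
            PySem.Dict.get?, PySem.Dict.contains]
        rw [hA, ih]
        simp [hpairs, h1, h2, show (1950 < y) by omega, show ¬ (1970 < y) by omega, show ¬ (2000 < y) by omega]
      · by_cases h3 : y ≤ 2000
        · have hA : yrStepA (PySem.Dict.mk [("1950", a), ("1970", b), ("2000", c), ("2024", e), ("DM", dm)]) row
              = PySem.Dict.mk [("1950", a), ("1970", b), ("2000", c ++ [r0]), ("2024", e), ("DM", dm ++ [r0])] := by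
            simp [yrStepA, ← hy, ← hr0, h1, h2, h3, PySem.Dict.modify, PySem.Dict.insert, PySem.Dict.getD,
              PySem.Dict.get?, PySem.Dict.contains]
          rw [hA, ih]
          simp [hpairs, h1, h3, show (1970 < y) by omega, show ¬ (2000 < y) by omega]
        · have hA : yrStepA (PySem.Dict.mk [("1950", a), ("1970", b), ("2000", c), ("2024", e), ("DM", dm)]) row
              = PySem.Dict.mk [("1950", a), ("1970", b), ("2000", c), ("2024", e ++ [r0]), ("DM", dm ++ [r0])] := by
            simp [yrStepA, ← hy, ← hr0, h1, h2, h3, PySem.Dict.modify, PySem.Dict.insert, PySem.Dict.getD,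
              PySem.Dict.get?, PySem.Dict.contains]
          rw [hA, ih]
          simp [hpairs, h1, h2, h3, show (2000 < y) by omega, show (1970 < y) by omega, show (1950 < y) by omega]

-- ===== VERDICT (by name: the statement is the Claim_ definition above) =====
theorem year_reader_spec : Claim_equal_year_reader := by
  intro csv _ _
  unfold Spec_year_reader year_reader year_reader_alt
  rw [yr_loop]
  simp
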